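-- pv_equiv track=rewrite | github.com/advice11/Affine-Cipher-Project | UTS_Kriptografi/program_kriptoanalisis.py | affine_cryptanalysis
-- ===== SOURCE A (Python) =====
-- def gcd(a, b):
--     """Fungsi untuk mengembalikan pembagi terbesar dari a dan b."""
--     if b == 0:
--         return a
--     else:
--         return gcd(b, a % b)
--
-- def mod_inverse(a, m):
--     """Fungsi untuk menemukan invers modular dari a dengan modulo m."""
--     for x in range(1, m):
--         if (a * x) % m == 1:
--             return x
--     raise ValueError(f"Tidak ada invers modular untuk a = {a} dan m = {m}")
--
-- def affine_decrypt(ciphertext, a, b):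
--     """Fungsi untuk mendekripsi ciphertext menggunakan Affine Cipher."""
--     m = 26  # Panjang alfabet (untuk huruf Inggris)
--
--     # Memastikan bahwa a dan m koprima
--     if gcd(a, m) != 1:
--         raise ValueError("a dan 26 tidak koprima. Pilih 'a' yang berbeda.")
--
--     # Menghitung invers modular dari a
--     a_inv = mod_inverse(a, m)
--
--     decrypted_text = ""
--     for char in ciphertext:
--         if char.isalpha():
--             # Mengonversi karakter ke indeks alfabet (0-25)
--             y = ord(char.lower()) - ord('a')
--             # Menghitung karakter didekripsi menggunakan formula Affine Cipher
--             decrypted_char = (a_inv * (y - b)) % m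
--             # Mengonversi kembali ke karakter dan menambahkan ke teks didekripsi
--             decrypted_text += chr(decrypted_char + ord('a'))
--         else:
--             # Menjaga karakter non-alfabet tetap sama
--             decrypted_text += char
--
--     return decrypted_text
--
-- def affine_cryptanalysis(ciphertext):
--     """Fungsi untuk melakukan kriptoanalisis pada ciphertext menggunakan Affine Cipher."""
--     m = 26  # Panjang alfabet (untuk huruf Inggris)
--     possible_solutions = []
--
--     # Mencoba semua kemungkinan nilai a dan b
--     for a in range(1, m):
--         if gcd(a, m) == 1:
--             a_inv = mod_inverse(a, m)
--             for b in range(m):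
--                 # Mendekripsi dengan pasangan a dan b
--                 decrypted_text = affine_decrypt(ciphertext, a, b)
--                 # Menyimpan pasangan dan hasil dekripsi
--                 possible_solutions.append((a, b, decrypted_text))
--
--     return possible_solutions
-- ===== SOURCE B (Python) =====
-- def affine_cryptanalysis(ciphertext):
--     """Factor the affine decryption a_inv*(y-b) = a_inv*y + b*(-a_inv) mod 26:
--     per multiplier a, compute the residues of the b=0 decryption once (None
--     marks characters kept verbatim), then derive each of the 26 b-decryptions
--     as a Caesar shift of that base.  Coprimality with 26 is the closed-form
--     test 'a odd and a != 13', and the inverse comes from Euler's theorem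
--     (a^11 mod 26) instead of a gcd recursion plus a linear scan."""
--     results = []
--     for a in range(1, 26):
--         if a % 2 == 0 or a == 13:
--             continue
--         a_inv = pow(a, 11, 26)
--         base = [a_inv * (ord(c.lower()) - 97) % 26 if c.isalpha() else None
--                 for c in ciphertext]
--         step = -a_inv % 26
--         for b in range(26):
--             s = b * step % 26
--             results.append((a, b, ''.join(
--                 c if v is None else chr((v + s) % 26 + 97)
--                 for v, c in zip(base, ciphertext))))
--     return results
-- ===== Notes on version B (the rewrite author's own statement) =====
-- stated objective: faster
-- what changed: B factors the affine decryption a_inv*(y-b) into a_inv*y + b*(-a_inv) mod 26: per multiplier a it computes the b=0 residue list once (None marking characters kept verbatim) and derives each of the 26 b-decryptions as a Caesar shift of that base, testing coprimality by parity and excluding 13, and taking the inverse from Euler's theorem pow(a,11,26) instead of A's gcd recursion plus linear inverse scan and per-key per-character affine arithmetic.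
import Mathlib
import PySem

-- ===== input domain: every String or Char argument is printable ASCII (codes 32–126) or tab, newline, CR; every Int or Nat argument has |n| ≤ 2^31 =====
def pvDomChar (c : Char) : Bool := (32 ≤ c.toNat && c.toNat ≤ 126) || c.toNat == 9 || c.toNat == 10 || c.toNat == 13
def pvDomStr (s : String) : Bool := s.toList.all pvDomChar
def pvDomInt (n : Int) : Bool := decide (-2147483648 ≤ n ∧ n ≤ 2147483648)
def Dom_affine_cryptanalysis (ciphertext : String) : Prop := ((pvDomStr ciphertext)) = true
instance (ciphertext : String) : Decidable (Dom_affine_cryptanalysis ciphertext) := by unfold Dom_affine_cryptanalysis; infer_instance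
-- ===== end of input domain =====

-- B factors the decryption map a_inv*(y-b) = a_inv*y + b*(-a_inv) mod 26: per multiplier a it
-- computes the b = 0 residues once and derives each of the 26 b-decryptions as a Caesar shift
-- of that base, with a closed-form coprimality test and the inverse from Euler's theorem
-- (objective: alternative staged algorithm).

-- ===== PORT A =====
def pvGcdA (a b : Int) : Int :=
  if b = 0 then a else pvGcdA b (PySem.Int.mod a b)
termination_by b.natAbs
decreasing_by
  rename_i h
  rcases lt_trichotomy b 0 with hb | hb | hb
  · have h1 := PySem.Int.mod_neg_bounds a hb
    omega
  · exact absurd hb h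
  · have h1 := PySem.Int.mod_nonneg a hb
    have h2 := PySem.Int.mod_lt a hb
    omega

-- mod_inverse: first x in range(1, m) with (a*x) % m == 1; none = the ValueError raise
def pvModInverseA (a m : Int) : Option Int :=
  (PySem.List.pyRange 1 m 1).find? (fun x => PySem.Int.mod (a * x) m == 1)

-- the character loop of affine_decrypt (the decrypted_text accumulation)
def pvDecryptLoopA (aInv b : Int) (cs : List Char) : List Char :=
  cs.foldl (fun acc c =>
    if PySem.Chars.isalpha c then
      acc ++ [Char.ofNat ((PySem.Int.mod (aInv * ((((PySem.Chars.lowerChar c).toNat : Int) - 97) - b)) 26 + 97).toNat)]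
    else acc ++ [c]) []

-- affine_decrypt; none = a raise (both raises are unreachable from affine_cryptanalysis)
def pvAffineDecryptA (ciphertext : List Char) (a b : Int) : Option (List Char) :=
  if pvGcdA a 26 ≠ 1 then none
  else
    match pvModInverseA a 26 with
    | none => none
    | some aInv => some (pvDecryptLoopA aInv b ciphertext)

def affine_cryptanalysis (ciphertext : String) : List (Int × Int × String) :=
  (PySem.List.pyRange 1 26 1).foldl (fun acc a =>
    if pvGcdA a 26 = 1 then
      match pvModInverseA a 26 with
      | none => acc   -- unreachable: mod_inverse raises only when no inverse exists, excluded by the gcd guard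
      | some _aInv =>
        (PySem.List.pyRange 0 26 1).foldl (fun acc2 b =>
          match pvAffineDecryptA ciphertext.toList a b with
          | none => acc2   -- unreachable: affine_decrypt raises only for non-coprime a
          | some d => acc2 ++ [(a, b, String.mk d)]) acc
    else acc) []

-- ===== PORT B =====
-- pow(a, 11, 26): the corresponding Lean function a^11 mod 26
def pvPow11B (a : Int) : Int := PySem.Int.mod (a ^ 11) 26

-- base = [a_inv * (ord(c.lower()) - 97) % 26 if c.isalpha() else None for c in ciphertext]
def pvBaseB (aInv : Int) (cs : List Char) : List (Option Int) :=
  cs.map (fun c =>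
    if PySem.Chars.isalpha c then
      some (PySem.Int.mod (aInv * (((PySem.Chars.lowerChar c).toNat : Int) - 97)) 26)
    else none)

-- ''.join(c if v is None else chr((v + s) % 26 + 97) for v, c in zip(base, ciphertext))
def pvShiftDecB (s : Int) (base : List (Option Int)) (cs : List Char) : List Char :=
  PySem.Chars.join []
    ((base.zip cs).map (fun p =>
      match p.1 with
      | none => [p.2]
      | some v => [Char.ofNat ((PySem.Int.mod (v + s) 26 + 97).toNat)]))

def affine_cryptanalysis_alt (ciphertext : String) : List (Int × Int × String) :=
  (PySem.List.pyRange 1 26 1).foldl (fun results a =>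
    if PySem.Int.mod a 2 == 0 || a == 13 then results
    else
      let aInv := pvPow11B a
      let base := pvBaseB aInv ciphertext.toList
      let step := PySem.Int.mod (-aInv) 26
      (PySem.List.pyRange 0 26 1).foldl (fun results b =>
        results ++ [(a, b, String.mk (pvShiftDecB (PySem.Int.mod (b * step) 26) base ciphertext.toList))]) results) []

-- ===== PRECONDITION & SPEC =====
def Spec_affine_cryptanalysis (ciphertext : String) (out : List (Int × Int × String)) : Prop := out = affine_cryptanalysis_alt ciphertext
instance (ciphertext : String) (out : List (Int × Int × String)) : Decidable (Spec_affine_cryptanalysis ciphertext out) := by unfold Spec_affine_cryptanalysis; infer_instance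

-- ===== CLAIM (what is proved, stated in full; the proofs are below) =====
def Claim_equal_affine_cryptanalysis : Prop := ∀ (ciphertext : String), Dom_affine_cryptanalysis ciphertext → Spec_affine_cryptanalysis ciphertext (affine_cryptanalysis ciphertext)

-- ===== LEMMAS AND PROOFS =====

lemma pvGcdA_unfold (a b : Int) :
    pvGcdA a b = if b = 0 then a else pvGcdA b (PySem.Int.mod a b) := by
  rw [pvGcdA]

-- A's recursive gcd agrees with Mathlib's gcd on nonnegative arguments
lemma pvGcdA_gcd (a b : Int) (ha : 0 ≤ a) (hb : 0 ≤ b) :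
    pvGcdA a b = ((Int.gcd a b : Nat) : Int) := by
  have H : ∀ n : Nat, ∀ b : Int, b.natAbs = n → 0 ≤ b → ∀ a : Int, 0 ≤ a →
      pvGcdA a b = ((Int.gcd a b : Nat) : Int) := by
    intro n
    induction n using Nat.strong_induction_on with
    | _ n ih =>
      intro b hbn hb a ha
      rw [pvGcdA_unfold]
      by_cases h0 : b = 0
      · subst h0
        rw [if_pos rfl, Int.gcd_zero_right, Int.natAbs_of_nonneg ha]
      · rw [if_neg h0]
        have hbpos : 0 < b := lt_of_le_of_ne hb (Ne.symm h0)
        rw [PySem.Int.mod_eq_emod_of_pos (a := a) hbpos]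
        have h1 : 0 ≤ a % b := Int.emod_nonneg a h0
        have h2 : a % b < b := Int.emod_lt_of_pos a hbpos
        rw [ih (a % b).natAbs (by omega) (a % b) rfl h1 b hb]
        rw [Int.gcd_comm, Int.gcd_emod]
  exact H b.natAbs b rfl hb a ha

-- on the scanned range: A's gcd guard coincides with B's parity test, and where it holds
-- A's scanned inverse is exactly B's Euler inverse a^11 mod 26
lemma pvGuardInv : ∀ a ∈ PySem.List.pyRange 1 26 1,
    (((Int.gcd a 26 : Nat) : Int) = 1 ↔ ¬(PySem.Int.mod a 2 = 0 ∨ a = 13)) ∧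
    (((Int.gcd a 26 : Nat) : Int) = 1 → pvModInverseA a 26 = some (pvPow11B a)) := by
  decide

lemma pvAffineDecryptA_eq (s : List Char) (a b aInv : Int)
    (hg : pvGcdA a 26 = 1) (hm : pvModInverseA a 26 = some aInv) :
    pvAffineDecryptA s a b = some (pvDecryptLoopA aInv b s) := by
  rw [pvAffineDecryptA, if_neg (by simp [hg]), hm]

-- the modular identity behind the Caesar-shift staging
lemma pvModShift (aInv b y : Int) :
    PySem.Int.mod (aInv * (y - b)) 26
      = PySem.Int.mod (PySem.Int.mod (aInv * y) 26 + PySem.Int.mod (b * PySem.Int.mod (-aInv) 26) 26) 26 := by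
  have h26 : (0:Int) < 26 := by norm_num
  simp only [PySem.Int.mod_eq_emod_of_pos h26]
  have h1 : Int.ModEq 26 (aInv * y % 26) (aInv * y) := Int.emod_emod_of_dvd _ dvd_rfl
  have h2 : Int.ModEq 26 (b * (-aInv % 26)) (b * -aInv) :=
    Int.ModEq.mul_left b (Int.emod_emod_of_dvd _ dvd_rfl)
  have h3 : Int.ModEq 26 (b * (-aInv % 26) % 26) (b * -aInv) :=
    (Int.emod_emod_of_dvd _ dvd_rfl).trans h2
  have h4 := h1.add h3
  have h5 : aInv * y + b * -aInv = aInv * (y - b) := by ring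
  rw [h5] at h4
  exact h4.symm

lemma pvJoin_nil_flatten (parts : List (List Char)) :
    PySem.Chars.join [] parts = parts.flatten := by
  induction parts with
  | nil => rfl
  | cons x xs ih =>
    cases xs with
    | nil => simp [PySem.Chars.join, List.intercalate, List.intersperse]
    | cons y ys =>
      rw [PySem.Chars.join_cons_cons, List.flatten_cons, ih]
      simp

lemma pvZipBase (aInv : Int) (cs : List Char) :
    (pvBaseB aInv cs).zip cs
      = cs.map (fun c => ((if PySem.Chars.isalpha c then
          some (PySem.Int.mod (aInv * (((PySem.Chars.lowerChar c).toNat : Int) - 97)) 26)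
        else none), c)) := by
  induction cs with
  | nil => rfl
  | cons x xs ih =>
    simp only [pvBaseB, List.map_cons, List.zip_cons_cons] at *
    rw [ih]

-- whole-string agreement: A's per-character affine formula = B's shifted base residues
lemma pvDec_eq (aInv b : Int) (cs : List Char) :
    pvDecryptLoopA aInv b cs
      = pvShiftDecB (PySem.Int.mod (b * PySem.Int.mod (-aInv) 26) 26) (pvBaseB aInv cs) cs := by
  rw [pvDecryptLoopA, pvShiftDecB, pvJoin_nil_flatten]
  have hfn : (fun (acc : List Char) (c : Char) =>
      if PySem.Chars.isalpha c then
        acc ++ [Char.ofNat ((PySem.Int.mod (aInv * ((((PySem.Chars.lowerChar c).toNat : Int) - 97) - b)) 26 + 97).toNat)]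
      else acc ++ [c])
      = (fun (acc : List Char) (c : Char) => acc ++
        (if PySem.Chars.isalpha c then
          [Char.ofNat ((PySem.Int.mod (aInv * ((((PySem.Chars.lowerChar c).toNat : Int) - 97) - b)) 26 + 97).toNat)]
        else [c])) := by
    funext acc c
    split <;> rfl
  rw [hfn, PySem.List.foldl_append_eq_flatMap, List.nil_append, List.flatMap_def]
  rw [pvZipBase aInv cs, List.map_map]
  congr 1
  apply List.map_congr_left
  intro c _
  by_cases h : PySem.Chars.isalpha c
  · simp only [Function.comp_apply, h, if_true]
    rw [pvModShift aInv b (((PySem.Chars.lowerChar c).toNat : Int) - 97)]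
  · simp [Function.comp_apply, h]

-- ===== VERDICT (by name: the statement is the Claim_ definition above) =====
theorem affine_cryptanalysis_spec : Claim_equal_affine_cryptanalysis := by
  intro s _hDom
  unfold Spec_affine_cryptanalysis affine_cryptanalysis affine_cryptanalysis_alt
  apply PySem.List.foldl_congr_mem
  intro acc a ha
  have hbounds : 1 ≤ a ∧ a < 26 := PySem.List.mem_pyRange_one.mp ha
  have hg : pvGcdA a 26 = ((Int.gcd a 26 : Nat) : Int) :=
    pvGcdA_gcd a 26 (by omega) (by norm_num)
  obtain ⟨hiff, hinv⟩ := pvGuardInv a ha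
  by_cases hguard : PySem.Int.mod a 2 = 0 ∨ a = 13
  · have hg0 : ¬ pvGcdA a 26 = 1 := by
      rw [hg]
      intro hc
      exact (hiff.mp hc) hguard
    rw [if_neg hg0, if_pos (by simp only [Bool.or_eq_true, beq_iff_eq]; exact hguard)]
  · have hg1 : pvGcdA a 26 = 1 := by
      rw [hg]; exact hiff.mpr hguard
    rw [if_pos hg1]
    have hm := hinv (hg ▸ hg1)
    rw [hm]
    have hB : ¬ (PySem.Int.mod a 2 == 0 || a == 13) = true := by
      simp only [Bool.or_eq_true, beq_iff_eq]
      exact hguard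
    rw [if_neg hB]
    apply PySem.List.foldl_congr_mem
    intro acc2 b _hb
    rw [pvAffineDecryptA_eq s.toList a b (pvPow11B a) hg1 hm, pvDec_eq]
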